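-- pv_equiv track=rewrite | github.com/Matylda05/Python | cwiczenia_5/polys.py | eq_poly
-- ===== SOURCE A (Python) =====
-- def eq_poly(poly1, poly2):        # bool, porównywanie poly1(x) == poly2(x)
--     poly1 = usun_zero_z_konca(poly1)
--     poly2 = usun_zero_z_konca(poly2)
--
--     if len(poly1) == len(poly2):
--         for i in range(len(poly2)):
--             if(poly1[i] != poly2[i]):
--                 return False
--
--     elif len(poly1) != len(poly2):
--         return False
--
--     return True
--
-- def usun_zero_z_konca(poly):
--     for i in range(len(poly)-1, 0, -1):
--         if(poly[i] == 0):
--             poly.pop(i)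
--         else:
--             break
--     return poly
-- ===== SOURCE B (Python) =====
-- def eq_poly(poly1, poly2):        # bool, porównywanie poly1(x) == poly2(x)
--     # compare coefficient-wise, treating missing higher coefficients as 0;
--     # no trimming pass and no mutation of the arguments
--     n = max(len(poly1), len(poly2))
--     for i in range(n):
--         a = poly1[i] if i < len(poly1) else 0
--         b = poly2[i] if i < len(poly2) else 0
--         if a != b:
--             return False
--     return True
-- ===== Notes on version B (the rewrite author's own statement) =====
-- stated objective: simpler
-- what changed: B drops the trimming pass entirely and compares the two lists coefficient-wise in one simultaneous scan, reading a missing higher coefficient as 0 (and it does not mutate its arguments, unlike A which trims them in place).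
-- intended difference: When exactly one list is empty and the other is nonempty but all zeros (e.g. [] vs [0]), A returns False because its trim keeps index 0, while B returns True, which is intended since both represent the zero polynomial. — e.g. on eq_poly([], [0]): A returns false, B returns true
import Mathlib
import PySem

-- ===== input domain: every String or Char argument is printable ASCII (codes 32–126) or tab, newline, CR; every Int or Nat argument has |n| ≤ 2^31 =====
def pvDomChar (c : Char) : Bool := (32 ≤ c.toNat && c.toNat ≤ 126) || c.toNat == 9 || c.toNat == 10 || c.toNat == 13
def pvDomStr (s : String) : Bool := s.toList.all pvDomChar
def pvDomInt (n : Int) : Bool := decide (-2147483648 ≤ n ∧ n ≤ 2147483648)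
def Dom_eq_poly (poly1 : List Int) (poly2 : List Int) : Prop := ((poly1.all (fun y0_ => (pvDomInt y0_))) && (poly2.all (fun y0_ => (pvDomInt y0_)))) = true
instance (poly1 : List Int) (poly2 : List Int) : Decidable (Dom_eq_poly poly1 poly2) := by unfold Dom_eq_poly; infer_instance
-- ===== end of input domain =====

-- B compares the polynomials coefficient-wise in one pass, padding the shorter list with zeros,
-- instead of trimming trailing zeros and comparing ('simpler'); A mutates its arguments in place
-- and B does not — the theorems are about the return value only.


-- ===== PORT A =====
-- A's helper loop 'for i in range(len-1, 0, -1): pop last if zero else break'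
-- = repeatedly drop the last element while length > 1 and it is 0.
def usun_zero_z_konca (poly : List Int) : List Int :=
  if _h : 1 < poly.length ∧ poly.getLast? = some 0 then
    usun_zero_z_konca poly.dropLast
  else poly
termination_by poly.length
decreasing_by simp [List.length_dropLast]; omega

def eq_poly (poly1 : List Int) (poly2 : List Int) : Bool :=
  let p1 := usun_zero_z_konca poly1
  let p2 := usun_zero_z_konca poly2
  if p1.length = p2.length then
    -- for i in range(len(poly2)): if poly1[i] != poly2[i]: return False ... return True
    (List.range p2.length).all (fun i => p1.getD i 0 == p2.getD i 0)
  else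
    false

-- ===== PORT B =====
-- 'for i in range(max(len1, len2)): compare poly[i] if in range else 0' — early return False = all
def eq_poly_alt (poly1 : List Int) (poly2 : List Int) : Bool :=
  (List.range (max poly1.length poly2.length)).all
    (fun i => poly1.getD i 0 == poly2.getD i 0)

-- ===== PRECONDITION & SPEC =====
-- When exactly one list is empty and the other is nonempty but all zeros, A returns False
-- (its trim keeps index 0) while B returns True, which is intended: both are the zero polynomial.
def D_eq_poly (poly1 : List Int) (poly2 : List Int) : Prop :=
  (poly1 = [] ∧ poly2 ≠ [] ∧ ∀ x ∈ poly2, x = 0) ∨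
  (poly2 = [] ∧ poly1 ≠ [] ∧ ∀ x ∈ poly1, x = 0)
instance (poly1 : List Int) (poly2 : List Int) : Decidable (D_eq_poly poly1 poly2) := by
  unfold D_eq_poly; infer_instance

def Spec_eq_poly (poly1 : List Int) (poly2 : List Int) (out : Bool) : Prop :=
  ¬ D_eq_poly poly1 poly2 → out = eq_poly_alt poly1 poly2
instance (poly1 : List Int) (poly2 : List Int) (out : Bool) : Decidable (Spec_eq_poly poly1 poly2 out) := by unfold Spec_eq_poly; infer_instance

def pvDiffWitness_eq_poly : List Int × List Int := ([], [0])
def pvDiffWitnessOut_eq_poly : Bool × Bool := (false, true)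

-- ===== CLAIM (what is proved, stated in full; the proofs are below) =====
def Claim_unchanged_eq_poly : Prop := ∀ (poly1 : List Int) (poly2 : List Int), Dom_eq_poly poly1 poly2 → Spec_eq_poly poly1 poly2 (eq_poly poly1 poly2)
def Claim_changed_eq_poly : Prop := Dom_eq_poly (pvDiffWitness_eq_poly.1) (pvDiffWitness_eq_poly.2) ∧ D_eq_poly (pvDiffWitness_eq_poly.1) (pvDiffWitness_eq_poly.2) ∧ eq_poly (pvDiffWitness_eq_poly.1) (pvDiffWitness_eq_poly.2) = pvDiffWitnessOut_eq_poly.1 ∧ eq_poly_alt (pvDiffWitness_eq_poly.1) (pvDiffWitness_eq_poly.2) = pvDiffWitnessOut_eq_poly.2 ∧ pvDiffWitnessOut_eq_poly.1 ≠ pvDiffWitnessOut_eq_poly.2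
def Claim_exact_eq_poly : Prop := ∀ (poly1 : List Int) (poly2 : List Int), Dom_eq_poly poly1 poly2 → D_eq_poly poly1 poly2 → eq_poly poly1 poly2 ≠ eq_poly_alt poly1 poly2

-- ===== LEMMAS AND PROOFS =====

theorem usun_nil : usun_zero_z_konca [] = [] := by
  rw [usun_zero_z_konca]; simp

theorem usun_single (a : Int) : usun_zero_z_konca [a] = [a] := by
  rw [usun_zero_z_konca]; simp

theorem getD_dropLast (poly : List Int) (i : Nat) (h : i < poly.length - 1) :
    poly.dropLast.getD i 0 = poly.getD i 0 := by
  rw [List.getD, List.getD, List.getElem?_dropLast, if_pos h]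

-- trimming never changes any zero-padded coefficient
theorem getD_usun (poly : List Int) (i : Nat) :
    (usun_zero_z_konca poly).getD i 0 = poly.getD i 0 := by
  rw [usun_zero_z_konca]
  split
  · rename_i h
    obtain ⟨hlen, hlast⟩ := h
    rw [getD_usun poly.dropLast i]
    by_cases hi : i < poly.length - 1
    · exact getD_dropLast poly i hi
    · by_cases hi2 : i < poly.length
      · have hieq : i = poly.length - 1 := by omega
        have hout : poly.dropLast.getD i 0 = 0 := by
          apply List.getD_eq_default
          rw [List.length_dropLast]; omega
        have hlastD : poly.getD i 0 = 0 := by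
          rw [List.getLast?_eq_getElem?] at hlast
          rw [hieq, List.getD, hlast]; rfl
        rw [hout, hlastD]
      · rw [List.getD_eq_default, List.getD_eq_default]
        · omega
        · rw [List.length_dropLast]; omega
  · rfl
termination_by poly.length
decreasing_by simp [List.length_dropLast]; omega

theorem usun_nil_iff (poly : List Int) : usun_zero_z_konca poly = [] ↔ poly = [] := by
  constructor
  · intro h
    by_contra hne
    rw [usun_zero_z_konca] at h
    revert h
    split
    · rename_i hc
      intro h
      have := (usun_nil_iff poly.dropLast).mp h
      have : poly.dropLast.length = 0 := by rw [this]; rfl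
      rw [List.length_dropLast] at this
      omega
    · intro h; exact hne h
  · intro h; subst h; exact usun_nil
termination_by poly.length
decreasing_by simp [List.length_dropLast]; omega

-- the result of trimming never has length > 1 with a zero last element
theorem usun_trimmed (poly : List Int) :
    ¬ (1 < (usun_zero_z_konca poly).length ∧ (usun_zero_z_konca poly).getLast? = some 0) := by
  rw [usun_zero_z_konca]
  split
  · exact usun_trimmed poly.dropLast
  · rename_i h; exact h
termination_by poly.length
decreasing_by simp [List.length_dropLast]; omega

-- trimming an all-zero nonempty list gives [0]
theorem usun_allzero (poly : List Int) (hne : poly ≠ []) (hz : ∀ x ∈ poly, x = 0) :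
    usun_zero_z_konca poly = [0] := by
  rw [usun_zero_z_konca]
  split
  · rename_i h
    apply usun_allzero
    · intro hc
      have : poly.dropLast.length = 0 := by rw [hc]; rfl
      rw [List.length_dropLast] at this
      omega
    · intro x hx
      exact hz x (List.mem_of_mem_dropLast hx)
  · rename_i h
    rcases poly with _ | ⟨a, rest⟩
    · exact absurd rfl hne
    rcases rest with _ | ⟨b, rest⟩
    · have := hz a (by simp)
      rw [this]
    · exfalso
      apply h
      constructor
      · simp
      · rw [List.getLast?_eq_some_getLast (by simp)]
        have := hz _ (List.getLast_mem (l := a :: b :: rest) (by simp))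
        rw [this]
termination_by poly.length
decreasing_by simp [List.length_dropLast]; omega

-- A's explicit index loop equals list equality once lengths agree
theorem range_all_eq (p1 p2 : List Int) (h : p1.length = p2.length) :
    (List.range p2.length).all (fun i => p1.getD i 0 == p2.getD i 0) = (p1 == p2) := by
  rcases Bool.eq_false_or_eq_true (p1 == p2) with hb | hb
  · rw [hb]
    have heq : p1 = p2 := by simpa using hb
    subst heq
    simp [List.getD]
  · rw [hb]
    have hne : p1 ≠ p2 := by simpa using hb
    rw [List.all_eq_false]
    by_contra hall
    apply hne
    apply List.ext_getElem h
    intro i hi1 hi2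
    push Not at hall
    have := hall i (List.mem_range.mpr hi2)
    simpa [List.getD, List.getElem?_eq_getElem, hi1, hi2] using this

-- B's bounded loop succeeds iff all zero-padded coefficients agree
theorem alt_true_iff (p1 p2 : List Int) :
    eq_poly_alt p1 p2 = true ↔ ∀ i, p1.getD i 0 = p2.getD i 0 := by
  unfold eq_poly_alt
  rw [List.all_eq_true]
  constructor
  · intro h i
    by_cases hi : i < max p1.length p2.length
    · simpa using h i (List.mem_range.mpr hi)
    · rw [List.getD_eq_default, List.getD_eq_default] <;> omega
  · intro h i _
    simpa [List.getD] using h i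

-- if all padded coefficients of two trimmed lists agree and the shorter is strictly shorter,
-- we are exactly in the []-vs-all-zero corner
theorem corner_case (p1 p2 : List Int)
    (h : ∀ i, p1.getD i 0 = p2.getD i 0)
    (hlt : (usun_zero_z_konca p1).length < (usun_zero_z_konca p2).length) :
    p1 = [] ∧ p2 ≠ [] ∧ ∀ x ∈ p2, x = 0 := by
  have ht : ∀ i, (usun_zero_z_konca p1).getD i 0 = (usun_zero_z_konca p2).getD i 0 := by
    intro i; rw [getD_usun, getD_usun]; exact h i
  set t1 := usun_zero_z_konca p1 with ht1
  set t2 := usun_zero_z_konca p2 with ht2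
  have ht2ne : t2 ≠ [] := by
    intro hc; rw [hc] at hlt; simp at hlt
  have hlast0 : t2.getD (t2.length - 1) 0 = 0 := by
    rw [← ht (t2.length - 1), List.getD_eq_default]
    omega
  have hlastsome : t2.getLast? = some 0 := by
    rw [List.getLast?_eq_getElem?]
    have hin : t2.length - 1 < t2.length := by
      have : 0 < t2.length := List.length_pos_of_ne_nil ht2ne
      omega
    rw [List.getD, List.getElem?_eq_getElem hin] at hlast0
    rw [List.getElem?_eq_getElem hin]
    simp at hlast0
    simp [hlast0]
  have hlen2 : t2.length = 1 := by
    have := usun_trimmed p2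
    rw [← ht2] at this
    have h1 : ¬ 1 < t2.length := fun hc => this ⟨hc, hlastsome⟩
    have : 0 < t2.length := List.length_pos_of_ne_nil ht2ne
    omega
  have hlen1 : t1.length = 0 := by omega
  have hp1 : p1 = [] := by
    rw [← usun_nil_iff, ← ht1]
    exact List.eq_nil_of_length_eq_zero hlen1
  refine ⟨hp1, ?_, ?_⟩
  · intro hc
    apply ht2ne
    rw [ht2, hc]
    exact usun_nil
  · intro x hx
    obtain ⟨i, hi, hget⟩ := List.getElem_of_mem hx
    have h2 := h i
    rw [hp1] at h2
    simp only [List.getD, List.getElem?_eq_getElem hi, Option.getD_some, List.getElem?_nil,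
      Option.getD_none] at h2
    rw [← hget, ← h2]

-- ===== VERDICT (by name: the statements are the Claim_ definitions above) =====
theorem eq_poly_spec : Claim_unchanged_eq_poly := by
  intro poly1 poly2 _ hD
  by_cases halt : eq_poly_alt poly1 poly2 = true
  · -- all padded coefficients agree ⇒ the trims are equal ⇒ A returns true
    have h := (alt_true_iff _ _).mp halt
    have ht : ∀ i, (usun_zero_z_konca poly1).getD i 0 = (usun_zero_z_konca poly2).getD i 0 := by
      intro i; rw [getD_usun, getD_usun]; exact h i
    have hlen : (usun_zero_z_konca poly1).length = (usun_zero_z_konca poly2).length := by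
      by_contra hne
      rcases Nat.lt_or_ge (usun_zero_z_konca poly1).length (usun_zero_z_konca poly2).length with hlt | hge
      · exact hD (Or.inl (corner_case poly1 poly2 h hlt))
      · have hlt : (usun_zero_z_konca poly2).length < (usun_zero_z_konca poly1).length := by omega
        exact hD (Or.inr (corner_case poly2 poly1 (fun i => (h i).symm) hlt))
    have heq : usun_zero_z_konca poly1 = usun_zero_z_konca poly2 := by
      apply List.ext_getElem hlen
      intro i hi1 hi2
      have := ht i
      rw [List.getD, List.getD, List.getElem?_eq_getElem hi1, List.getElem?_eq_getElem hi2] at this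
      simpa using this
    rw [halt]
    unfold eq_poly
    simp only [hlen, if_pos]
    rw [range_all_eq _ _ hlen]
    simp [heq]
  · -- some padded coefficient differs ⇒ the trims differ ⇒ A returns false
    have halt' : eq_poly_alt poly1 poly2 = false := by
      rcases Bool.eq_false_or_eq_true (eq_poly_alt poly1 poly2) with hb | hb
      · exact absurd hb halt
      · exact hb
    rw [halt']
    unfold eq_poly
    by_cases hlen : (usun_zero_z_konca poly1).length = (usun_zero_z_konca poly2).length
    · simp only [hlen, if_pos]
      rw [range_all_eq _ _ hlen]
      rw [beq_eq_false_iff_ne]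
      intro hc
      apply halt
      rw [alt_true_iff]
      intro i
      rw [← getD_usun poly1 i, ← getD_usun poly2 i, hc]
    · simp [hlen]

theorem eq_poly_changed : Claim_changed_eq_poly := by
  unfold Claim_changed_eq_poly pvDiffWitness_eq_poly pvDiffWitnessOut_eq_poly
  refine ⟨by decide, by decide, ?_, by decide, by decide⟩
  unfold eq_poly
  rw [usun_nil, usun_single]
  simp

theorem eq_poly_tight : Claim_exact_eq_poly := by
  intro poly1 poly2 _ hD
  have key : ∀ p1 p2 : List Int, p1 = [] → p2 ≠ [] → (∀ x ∈ p2, x = 0) →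
      eq_poly p1 p2 = false ∧ eq_poly p2 p1 = false ∧
      eq_poly_alt p1 p2 = true ∧ eq_poly_alt p2 p1 = true := by
    intro p1 p2 hp1 hne hz
    subst hp1
    have ht2 : usun_zero_z_konca p2 = [0] := usun_allzero p2 hne hz
    have hz' : ∀ i, ([] : List Int).getD i 0 = p2.getD i 0 := by
      intro i
      rcases Nat.lt_or_ge i p2.length with hi | hi
      · have h0 := hz _ (List.getElem_mem hi)
        simp only [List.getD, List.getElem?_eq_getElem hi, Option.getD_some, List.getElem?_nil,
          Option.getD_none]
        exact h0.symm
      · rw [List.getD_eq_default, List.getD_eq_default] <;> simp [hi]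
    refine ⟨?_, ?_, ?_, ?_⟩
    · unfold eq_poly
      rw [usun_nil, ht2]
      simp
    · unfold eq_poly
      rw [usun_nil, ht2]
      simp
    · exact (alt_true_iff _ _).mpr hz'
    · exact (alt_true_iff _ _).mpr (fun i => (hz' i).symm)
  rcases hD with ⟨h1, h2, h3⟩ | ⟨h1, h2, h3⟩
  · obtain ⟨ha, _, hb, _⟩ := key poly1 poly2 h1 h2 h3
    rw [ha, hb]; simp
  · obtain ⟨_, ha, _, hb⟩ := key poly2 poly1 h1 h2 h3
    rw [ha, hb]; simp
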